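-- pv_equiv track=rewrite | github.com/Marianadaso3/Laboratorio2-Redes | Receptor.py | verificar_fletcher_checksum
-- ===== SOURCE A (Python) =====
-- def verificar_fletcher_checksum(mensaje):
--     modulo = 255
--     sum1 = 0
--     sum2 = 0
--
--     for byte in mensaje:
--         sum1 = (sum1 + byte) % modulo
--         sum2 = (sum2 + sum1) % modulo
--
--     checksum = (sum2 << 8) | sum1
--
--     return checksum == 0
-- ===== SOURCE B (Python) =====
-- def verificar_fletcher_checksum(mensaje):
--     n = len(mensaje)
--     sum1 = sum(mensaje) % 255
--     sum2 = sum((n - i) * b for i, b in enumerate(mensaje)) % 255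
--     return ((sum2 << 8) | sum1) == 0
-- ===== Notes on version B (the rewrite author's own statement) =====
-- stated objective: alternative
-- what changed: Replaces the coupled running recurrence (sum2 depends on the running sum1 at every step) by two independent closed-form aggregates: sum1 = sum(mensaje) % 255 and sum2 = position-weighted sum((n-i)*b) % 255.
import Mathlib
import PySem

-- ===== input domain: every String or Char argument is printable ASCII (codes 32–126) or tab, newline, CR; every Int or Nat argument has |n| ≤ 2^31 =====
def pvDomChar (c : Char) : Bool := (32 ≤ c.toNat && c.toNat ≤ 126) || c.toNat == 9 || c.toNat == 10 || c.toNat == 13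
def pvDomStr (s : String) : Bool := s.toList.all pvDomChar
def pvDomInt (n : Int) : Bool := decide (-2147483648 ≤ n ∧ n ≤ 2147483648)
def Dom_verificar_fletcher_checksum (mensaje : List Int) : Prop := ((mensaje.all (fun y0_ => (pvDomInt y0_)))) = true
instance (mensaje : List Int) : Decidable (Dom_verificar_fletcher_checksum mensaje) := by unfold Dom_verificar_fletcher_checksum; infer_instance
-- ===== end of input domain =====

-- B replaces A's coupled running recurrence by two independent closed-form aggregates
-- (plain sum and position-weighted sum, each taken mod 255); objective: alternative decomposition.

-- ===== PORT A =====
def verificar_fletcher_checksum (mensaje : List Int) : Bool :=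
  let modulo : Int := 255
  let s := mensaje.foldl
    (fun (st : Int × Int) byte =>
      let sum1 := PySem.Int.mod (st.1 + byte) modulo
      let sum2 := PySem.Int.mod (st.2 + sum1) modulo
      (sum1, sum2))
    ((0 : Int), (0 : Int))
  let checksum := PySem.Int.bor (s.2 <<< (8 : Nat)) s.1
  decide (checksum = 0)

-- ===== PORT B =====
def verificar_fletcher_checksum_alt (mensaje : List Int) : Bool :=
  let n : Int := (mensaje.length : Int)
  let sum1 := PySem.Int.mod (mensaje.foldl (· + ·) 0) 255
  let sum2 := PySem.Int.mod
    ((PySem.List.enumerate mensaje).foldl (fun acc p => acc + (n - p.1) * p.2) 0) 255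
  decide (PySem.Int.bor (sum2 <<< (8 : Nat)) sum1 = 0)

-- ===== PRECONDITION & SPEC =====
def Spec_verificar_fletcher_checksum (mensaje : List Int) (out : Bool) : Prop := out = verificar_fletcher_checksum_alt mensaje
instance (mensaje : List Int) (out : Bool) : Decidable (Spec_verificar_fletcher_checksum mensaje out) := by unfold Spec_verificar_fletcher_checksum; infer_instance

-- ===== CLAIM (what is proved, stated in full; the proofs are below) =====
def Claim_equal_verificar_fletcher_checksum : Prop := ∀ (mensaje : List Int), Dom_verificar_fletcher_checksum mensaje → Spec_verificar_fletcher_checksum mensaje (verificar_fletcher_checksum mensaje)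

-- ===== LEMMAS AND PROOFS =====

/-- Weighted sum with weights w, w-1, w-2, … over the list. -/
def wtFrom : List Int → Int → Int
  | [], _ => 0
  | x :: xs, w => w * x + wtFrom xs (w - 1)

theorem pyMod255 (x : Int) : PySem.Int.mod x 255 = x % 255 :=
  PySem.Int.mod_eq_emod_of_pos (by norm_num)

theorem enum_fold_eq_wtFrom (xs : List Int) (n : Int) :
    ∀ (s init : Int),
      (PySem.List.enumerate xs s).foldl (fun acc p => acc + (n - p.1) * p.2) init
        = init + wtFrom xs (n - s) := by
  induction xs with
  | nil => intro s init; simp [PySem.List.enumerate_nil, wtFrom]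
  | cons x xs ih =>
      intro s init
      rw [PySem.List.enumerate_cons, List.foldl_cons, ih (s + 1), wtFrom]
      ring_nf

theorem foldA_eq (xs : List Int) :
    ∀ (a b : Int),
      xs.foldl
        (fun (st : Int × Int) byte =>
          (PySem.Int.mod (st.1 + byte) 255,
           PySem.Int.mod (st.2 + PySem.Int.mod (st.1 + byte) 255) 255))
        (a % 255, b % 255)
      = ((a + xs.sum) % 255,
         (b + (xs.length : Int) * a + wtFrom xs (xs.length : Int)) % 255) := by
  induction xs with
  | nil => intro a b; simp [wtFrom]
  | cons x xs ih =>
      intro a b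
      rw [List.foldl_cons]
      have h1 : PySem.Int.mod (a % 255 + x) 255 = (a + x) % 255 := by
        rw [pyMod255]; omega
      have h2 : PySem.Int.mod (b % 255 + (a + x) % 255) 255 = (b + a + x) % 255 := by
        rw [pyMod255]; omega
      rw [show (PySem.Int.mod (a % 255 + x) 255,
            PySem.Int.mod (b % 255 + PySem.Int.mod (a % 255 + x) 255) 255)
          = ((a + x) % 255, (b + a + x) % 255) by rw [h1, h2]]
      rw [ih (a + x) (b + a + x)]
      refine Prod.ext ?_ ?_
      · simp only [List.sum_cons]
        congr 1; ring
      · simp only [List.length_cons, wtFrom]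
        push_cast
        congr 1; ring_nf

theorem verificar_fletcher_eq (mensaje : List Int) :
    verificar_fletcher_checksum mensaje = verificar_fletcher_checksum_alt mensaje := by
  unfold verificar_fletcher_checksum verificar_fletcher_checksum_alt
  simp only []
  have hA := foldA_eq mensaje 0 0
  simp only [Int.zero_emod, zero_add, mul_zero, add_zero] at hA
  rw [hA]
  have hS : mensaje.foldl (· + ·) 0 = mensaje.sum := by
    have := PySem.List.foldl_add (g := fun x : Int => x) (l := mensaje) (a := 0)
    simpa using this
  have hW := enum_fold_eq_wtFrom mensaje (mensaje.length : Int) 0 0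
  simp only [sub_zero, zero_add] at hW
  rw [hS, hW, pyMod255, pyMod255]

-- ===== VERDICT (by name: the statement is the Claim_ definition above) =====
theorem verificar_fletcher_checksum_spec : Claim_equal_verificar_fletcher_checksum := by
  intro mensaje _
  unfold Spec_verificar_fletcher_checksum
  exact verificar_fletcher_eq mensaje
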